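-- pv_equiv track=rewrite | github.com/miaomiao1205/xir_BDUMDR | Src/domain_class/topic_classification.py | map_to_predefined_topic
-- ===== SOURCE A (Python) =====
-- PREDEFINED_TOPICS = {
--     "Books & Literature": ["WrittenWork"],
--     "Science & Mathematics": ["Science & Mathematics", "EducationalInstitution"],
--     "Life & Health": ["Health", "Animal", "Plant"],
--     "Jobs & Education": ["Education & Reference"],
--     "Computers & Internet": ["Computers & Internet", "Company"],
--     "Sports": ["Sports", "Athlete"],
--     "Business & Finance": ["Business & Finance", "OfficeHolder"],
--     "Politics & Government": ["Politics & Government"],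
--     "Traffic & Transportation": ["MeanOfTransportation"],
--     "Arts & Entertainment": ["Entertainment & Music", "Artist", "Album", "Film"],
--     "Geography": ["Building", "Village", "NaturalPlace"],
--     "Others": []
-- }
--
-- def map_to_predefined_topic(db_label, yahoo_label):
--     for topic, keywords in PREDEFINED_TOPICS.items():
--         if yahoo_label in keywords:
--             return topic
--     for topic, keywords in PREDEFINED_TOPICS.items():
--         if db_label in keywords:
--             return topic
--     return "Others (OT)"
-- ===== SOURCE B (Python) =====
-- PREDEFINED_TOPICS = {
--     "Books & Literature": ["WrittenWork"],
--     "Science & Mathematics": ["Science & Mathematics", "EducationalInstitution"],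
--     "Life & Health": ["Health", "Animal", "Plant"],
--     "Jobs & Education": ["Education & Reference"],
--     "Computers & Internet": ["Computers & Internet", "Company"],
--     "Sports": ["Sports", "Athlete"],
--     "Business & Finance": ["Business & Finance", "OfficeHolder"],
--     "Politics & Government": ["Politics & Government"],
--     "Traffic & Transportation": ["MeanOfTransportation"],
--     "Arts & Entertainment": ["Entertainment & Music", "Artist", "Album", "Film"],
--     "Geography": ["Building", "Village", "NaturalPlace"],
--     "Others": []
-- }
--
-- def map_to_predefined_topic(db_label, yahoo_label):
--     # one combined pass: accumulate the first-matching topic for each label at once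
--     y_topic = d_topic = None
--     for topic, keywords in PREDEFINED_TOPICS.items():
--         for kw in keywords:
--             if y_topic is None and kw == yahoo_label:
--                 y_topic = topic
--             if d_topic is None and kw == db_label:
--                 d_topic = topic
--     if y_topic is not None:
--         return y_topic
--     if d_topic is not None:
--         return d_topic
--     return "Others (OT)"
-- ===== Notes on version B (the rewrite author's own statement) =====
-- stated objective: alternative
-- what changed: Replaces A's two staged early-return scans (yahoo pass over the whole table, then a db pass) by a single combined pass over the flattened keyword table that accumulates the first-matching topic for both labels at once and only afterwards applies the yahoo-before-db precedence and the 'Others (OT)' fallback.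
import Mathlib
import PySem

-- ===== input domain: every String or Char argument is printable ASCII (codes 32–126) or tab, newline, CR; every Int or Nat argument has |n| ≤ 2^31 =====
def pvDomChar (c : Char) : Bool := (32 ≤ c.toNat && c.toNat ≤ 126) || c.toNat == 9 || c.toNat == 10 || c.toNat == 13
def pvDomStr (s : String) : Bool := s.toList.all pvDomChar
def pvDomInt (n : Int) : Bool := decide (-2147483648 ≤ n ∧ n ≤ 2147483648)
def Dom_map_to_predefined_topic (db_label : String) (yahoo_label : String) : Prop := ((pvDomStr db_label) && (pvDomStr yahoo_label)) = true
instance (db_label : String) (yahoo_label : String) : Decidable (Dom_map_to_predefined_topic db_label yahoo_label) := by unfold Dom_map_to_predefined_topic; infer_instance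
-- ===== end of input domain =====

-- B replaces A's two staged early-return scans by one combined pass over the flattened
-- keyword table, accumulating the first match for both labels at once (same precedence).

-- ===== PORT A =====
-- PREDEFINED_TOPICS as an insertion-ordered dict (topic -> keyword list)
def PREDEFINED_TOPICS : PySem.Dict String (List String) := PySem.Dict.ofList [
  ("Books & Literature", ["WrittenWork"]),
  ("Science & Mathematics", ["Science & Mathematics", "EducationalInstitution"]),
  ("Life & Health", ["Health", "Animal", "Plant"]),
  ("Jobs & Education", ["Education & Reference"]),
  ("Computers & Internet", ["Computers & Internet", "Company"]),
  ("Sports", ["Sports", "Athlete"]),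
  ("Business & Finance", ["Business & Finance", "OfficeHolder"]),
  ("Politics & Government", ["Politics & Government"]),
  ("Traffic & Transportation", ["MeanOfTransportation"]),
  ("Arts & Entertainment", ["Entertainment & Music", "Artist", "Album", "Film"]),
  ("Geography", ["Building", "Village", "NaturalPlace"]),
  ("Others", [])]

-- A's 'for topic, keywords in …: if lbl in keywords: return topic' loop (early return = Option)
def pvScanTopics : List (String × List String) → String → Option String
  | [], _ => none
  | (topic, keywords) :: rest, lbl =>
      if keywords.contains lbl then some topic else pvScanTopics rest lbl

def map_to_predefined_topic (db_label : String) (yahoo_label : String) : String :=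
  match pvScanTopics PREDEFINED_TOPICS.items yahoo_label with
  | some topic => topic
  | none =>
    match pvScanTopics PREDEFINED_TOPICS.items db_label with
    | some topic => topic
    | none => "Others (OT)"

-- ===== PORT B =====
-- body of B's inner loop: 'if y_topic is None and kw == yahoo_label: …; if d_topic is None and kw == db_label: …'
def pvPairStep (yahoo_label db_label : String) (topic : String)
    (st : Option String × Option String) (kw : String) : Option String × Option String :=
  ((if st.1.isNone && (kw == yahoo_label) then some topic else st.1),
   (if st.2.isNone && (kw == db_label) then some topic else st.2))

def map_to_predefined_topic_alt (db_label : String) (yahoo_label : String) : String :=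
  let st := PREDEFINED_TOPICS.items.foldl
    (fun st p => p.2.foldl (pvPairStep yahoo_label db_label p.1) st)
    (none, none)
  match st.1 with
  | some t => t
  | none =>
    match st.2 with
    | some t => t
    | none => "Others (OT)"

-- ===== PRECONDITION & SPEC =====
def Spec_map_to_predefined_topic (db_label : String) (yahoo_label : String) (out : String) : Prop := out = map_to_predefined_topic_alt db_label yahoo_label
instance (db_label : String) (yahoo_label : String) (out : String) : Decidable (Spec_map_to_predefined_topic db_label yahoo_label out) := by unfold Spec_map_to_predefined_topic; infer_instance

-- ===== CLAIM (what is proved, stated in full; the proofs are below) =====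
def Claim_equal_map_to_predefined_topic : Prop := ∀ (db_label : String) (yahoo_label : String), Dom_map_to_predefined_topic db_label yahoo_label → Spec_map_to_predefined_topic db_label yahoo_label (map_to_predefined_topic db_label yahoo_label)

-- ===== LEMMAS AND PROOFS =====

-- the inner keyword loop fills each still-empty accumulator with `topic` iff the keyword list contains its label
theorem pvInner_eq (y db topic : String) (kws : List String) (st : Option String × Option String) :
    kws.foldl (pvPairStep y db topic) st =
      ((if st.1.isSome then st.1 else if kws.contains y then some topic else none),
       (if st.2.isSome then st.2 else if kws.contains db then some topic else none)) := by
  induction kws generalizing st with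
  | nil =>
    cases st with
    | mk a b => cases a <;> cases b <;> simp [List.foldl]
  | cons kw rest ih =>
    rw [List.foldl_cons, ih]
    cases st with
    | mk a b =>
      cases a <;> cases b <;>
        simp only [pvPairStep, Option.isNone_none, Option.isNone_some, Bool.true_and,
          Bool.false_and, List.contains_cons] <;>
        by_cases hy : y = kw <;> by_cases hd : db = kw <;>
        simp [hy, hd, BEq.comm]

-- the combined outer fold computes exactly A's two scans, componentwise
theorem pvFold_eq (y db : String) (L : List (String × List String))
    (st : Option String × Option String) :
    L.foldl (fun st p => p.2.foldl (pvPairStep y db p.1) st) st =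
      ((if st.1.isSome then st.1 else pvScanTopics L y),
       (if st.2.isSome then st.2 else pvScanTopics L db)) := by
  induction L generalizing st with
  | nil =>
    cases st with
    | mk a b => cases a <;> cases b <;> simp [List.foldl, pvScanTopics]
  | cons p rest ih =>
    rw [List.foldl_cons, pvInner_eq, ih]
    cases st with
    | mk a b =>
      cases a <;> cases b <;>
        simp only [Option.isSome_none, Option.isSome_some, if_true, pvScanTopics] <;>
        split_ifs <;> simp_all

-- ===== VERDICT (by name: the statement is the Claim_ definition above) =====
theorem map_to_predefined_topic_spec : Claim_equal_map_to_predefined_topic := by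
  intro db y _
  unfold Spec_map_to_predefined_topic map_to_predefined_topic map_to_predefined_topic_alt
  rw [pvFold_eq]
  simp only [Option.isSome_none, if_false, Bool.false_eq_true]
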